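-- pv_equiv track=rewrite | github.com/kanitsch/ASD | dynamiczne/cw2.py | sklejanie
-- ===== SOURCE A (Python) =====
-- def binary_search2(tab, value):
--     _start = 0
--     _end = len( tab ) - 1
--     while _start <= _end:
--         middle = ( _start + _end ) // 2
--         if value > tab[ middle ][0]: _start = middle + 1
--         else: _end = middle - 1
--     if _start < len(tab) and tab[ _start ][0] == value:
--         return _start
--     return -1
--
-- def sklejanie(P,a,b):
--     n=len(P)
--     f=[None for _ in range(n)]
--     P.sort()
--     def rek(i):
--         if f[i]!=None:
--             return f[i]
--         if P[i][1]==b: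
--             f[i]=True
--             return True
--         x=binary_search2(P,P[i][1])
--         if x==-1:
--             f[i]=False
--             return f[i]
--         f[i]=False
--         while x<n and P[x][0]==P[i][1]:
--             if rek(x):
--                 f[i]=True
--             x+=1
--         return f[i]
--     i=binary_search2(P,a)
--     while i<n and P[i][0]==a:
--         if rek(i):
--             return True
--         i+=1
--     return False
-- ===== SOURCE B (Python) =====
-- def sklejanie(P, a, b):
--     # Fixpoint saturation over reachable VALUES instead of memoized DFS over segments.
--     # (Sorts P in place, like the original.)
--     P.sort()
--     reach = {a}
--     for _ in range(len(P)):
--         reach = reach | {v for (u, v) in P if u in reach}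
--     return any(u in reach and v == b for (u, v) in P)
-- ===== Notes on version B (the rewrite author's own statement) =====
-- stated objective: alternative
-- what changed: Replaced the memoized recursive segment-DFS with its hand-written binary search by an iterative value-level fixpoint saturation: grow the set of values reachable from a for len(P) rounds, then check for any segment that starts in the reached set and ends at b.
-- outside the precondition, e.g. on sklejanie([], 1, 2): A raises IndexError, B returns False
-- crash fix: On the empty list A raises IndexError (binary_search2 returns -1 and the outer loop evaluates P[-1][0] with n=0, since -1 < 0); B returns False there. — e.g. on sklejanie([], 1, 2): A raises IndexError, B returns false
import Mathlib
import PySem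

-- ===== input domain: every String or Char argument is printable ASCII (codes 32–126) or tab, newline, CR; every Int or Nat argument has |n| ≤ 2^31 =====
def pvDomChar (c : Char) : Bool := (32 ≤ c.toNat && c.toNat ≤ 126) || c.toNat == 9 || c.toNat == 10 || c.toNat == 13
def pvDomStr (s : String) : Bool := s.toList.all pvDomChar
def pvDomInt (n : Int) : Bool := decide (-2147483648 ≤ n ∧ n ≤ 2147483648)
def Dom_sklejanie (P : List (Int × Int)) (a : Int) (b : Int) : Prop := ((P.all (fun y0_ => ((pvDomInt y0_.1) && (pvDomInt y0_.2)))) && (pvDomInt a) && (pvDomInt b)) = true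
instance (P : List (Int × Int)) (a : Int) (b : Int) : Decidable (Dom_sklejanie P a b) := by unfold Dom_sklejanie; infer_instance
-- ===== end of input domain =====

-- B replaces A's memoized recursive segment-DFS (with hand-written binary search) by an
-- iterative value-level fixpoint saturation; equivalence is about the return value (both
-- sort their argument in place in Python).

-- ===== PORT A =====
def midPt (s e : Int) : Int := PySem.Int.floordiv (s + e) 2   -- middle = (_start + _end) // 2

def bs2Go (tab : List (Int × Int)) (value : Int) (s e : Int) : Int :=
  if h : s ≤ e then
    if value > (PySem.List.pyGetD tab (midPt s e) (0, 0)).1 then bs2Go tab value (midPt s e + 1) e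
    else bs2Go tab value s (midPt s e - 1)
  else s
termination_by (e + 1 - s).toNat
decreasing_by
  · have hb := PySem.Int.floordiv_two_mid_bounds h
    simp only [midPt] at *
    omega
  · have hb := PySem.Int.floordiv_two_mid_bounds h
    simp only [midPt] at *
    omega

def binarySearch2 (tab : List (Int × Int)) (value : Int) : Int :=
  let st := bs2Go tab value 0 ((tab.length : Int) - 1)
  if st < (tab.length : Int) ∧ (PySem.List.pyGetD tab st (0, 0)).1 = value then st else -1

-- 'return f[i]' at the end of rek's body
def rekRet (f2 : List (Option Bool)) (i : Int) : Bool × List (Option Bool) :=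
  (match PySem.List.pyGetD f2 i none with | some v => v | none => false, f2)

mutual
def rek (Q : List (Int × Int)) (b : Int) (fuel : Nat) (i : Int) (f : List (Option Bool)) :
    Bool × List (Option Bool) :=
  match fuel with
  | 0 => (false, f)
  | fuel + 1 =>
    match PySem.List.pyGetD f i none with
    | some v => (v, f)
    | none =>
      if (PySem.List.pyGetD Q i (0, 0)).2 = b then (true, PySem.List.pySetD f i (some true))
      else if binarySearch2 Q (PySem.List.pyGetD Q i (0, 0)).2 = -1 then
        (false, PySem.List.pySetD f i (some false))
      else
        rekRet
          (rekW Q b fuel i (PySem.List.pyGetD Q i (0, 0)).2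
            (binarySearch2 Q (PySem.List.pyGetD Q i (0, 0)).2)
            (PySem.List.pySetD f i (some false))) i
termination_by (fuel, 0)

def rekW (Q : List (Int × Int)) (b : Int) (fuel : Nat) (i : Int) (v : Int) (x : Int)
    (f : List (Option Bool)) : List (Option Bool) :=
  if h : x < (Q.length : Int) ∧ (PySem.List.pyGetD Q x (0, 0)).1 = v then
    rekW Q b fuel i v (x + 1)
      (if (rek Q b fuel x f).1 then PySem.List.pySetD (rek Q b fuel x f).2 i (some true)
       else (rek Q b fuel x f).2)
  else f
termination_by (fuel, ((Q.length : Int) - x).toNat + 1)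
decreasing_by
  · exact Prod.Lex.right _ (by omega)
  · exact Prod.Lex.right _ (by omega)
end

def outerLoop (Q : List (Int × Int)) (a b : Int) (i : Int) (f : List (Option Bool)) : Bool :=
  if h : i < (Q.length : Int) ∧ (PySem.List.pyGetD Q i (0, 0)).1 = a then
    if (rek Q b (Q.length + 1) i f).1 then true
    else outerLoop Q a b (i + 1) (rek Q b (Q.length + 1) i f).2
  else false
termination_by ((Q.length : Int) - i).toNat
decreasing_by omega

def sklejanie (P : List (Int × Int)) (a : Int) (b : Int) : Bool :=
  let Q := PySem.List.sorted2 P Prod.fst Prod.snd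
  outerLoop Q a b (binarySearch2 Q a) (List.replicate Q.length none)

-- ===== PORT B =====
def stepReach (Q : List (Int × Int)) (r : PySem.Set Int) : PySem.Set Int :=
  PySem.Set.union r
    (PySem.Set.ofList (Q.filterMap (fun p => if PySem.Set.contains r p.1 then some p.2 else none)))

def sklejanie_alt (P : List (Int × Int)) (a : Int) (b : Int) : Bool :=
  let Q := PySem.List.sorted2 P Prod.fst Prod.snd
  let reach := (List.range Q.length).foldl (fun r _ => stepReach Q r) (PySem.Set.ofList [a])
  Q.any (fun p => PySem.Set.contains reach p.1 && p.2 == b)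

-- ===== PRECONDITION & SPEC =====
-- Pre_ excludes only the empty list, on which A raises IndexError: binary_search2 returns
-- -1, and the outer loop's 'while i<n and P[i][0]==a' evaluates P[-1][0] with n=0
-- (since -1 < 0 is true); the Raises_ block below makes this checkable.
def Pre_sklejanie (P : List (Int × Int)) (a : Int) (b : Int) : Prop := P ≠ []
instance (P : List (Int × Int)) (a : Int) (b : Int) : Decidable (Pre_sklejanie P a b) := by
  unfold Pre_sklejanie; infer_instance

def pvWitness_sklejanie : (List (Int × Int)) × Int × Int := ([(1, 2), (2, 3)], 1, 3)

-- On the empty list A raises IndexError (it evaluates P[-1][0] after the failed binary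
-- search, since -1 < n = 0); B returns False there.
def Raises_sklejanie (P : List (Int × Int)) (a : Int) (b : Int) : Prop := P = []
instance (P : List (Int × Int)) (a : Int) (b : Int) : Decidable (Raises_sklejanie P a b) := by
  unfold Raises_sklejanie; infer_instance

def pvRaiseWitness_sklejanie : (List (Int × Int)) × Int × Int := ([], 1, 2)
def pvRaiseWitnessOut_sklejanie : Bool := false

def Spec_sklejanie (P : List (Int × Int)) (a : Int) (b : Int) (out : Bool) : Prop :=
  out = sklejanie_alt P a b
instance (P : List (Int × Int)) (a : Int) (b : Int) (out : Bool) :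
    Decidable (Spec_sklejanie P a b out) := by unfold Spec_sklejanie; infer_instance

-- ===== CLAIM (what is proved, stated in full; the proofs are below) =====
def Claim_equal_sklejanie : Prop := ∀ (P : List (Int × Int)) (a : Int) (b : Int),
  Dom_sklejanie P a b → Pre_sklejanie P a b → Spec_sklejanie P a b (sklejanie P a b)

def Claim_raises_sklejanie : Prop :=
  (∀ (P : List (Int × Int)) (a : Int) (b : Int), Dom_sklejanie P a b →
    Raises_sklejanie P a b → ¬ Pre_sklejanie P a b) ∧
  (Dom_sklejanie (pvRaiseWitness_sklejanie.1) (pvRaiseWitness_sklejanie.2.1)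
      (pvRaiseWitness_sklejanie.2.2) ∧
    Raises_sklejanie (pvRaiseWitness_sklejanie.1) (pvRaiseWitness_sklejanie.2.1)
      (pvRaiseWitness_sklejanie.2.2) ∧
    sklejanie_alt (pvRaiseWitness_sklejanie.1) (pvRaiseWitness_sklejanie.2.1)
      (pvRaiseWitness_sklejanie.2.2) = pvRaiseWitnessOut_sklejanie)

-- ===== LEMMAS AND PROOFS =====

-- ===== infrastructure =====
def mget (M : List (Option Bool)) (j : Nat) : Option Bool := M.getD j none
def qget (Q : List (Int × Int)) (j : Nat) : Int × Int := Q.getD j (0, 0)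

inductive RB (Q : List (Int × Int)) (b : Int) : Int → Prop
  | base : RB Q b b
  | step {u w : Int} : (u, w) ∈ Q → RB Q b w → RB Q b u

def leB (o1 o2 : Option Bool) : Prop :=
  o1 = none ∨ o2 = o1 ∨ (o1 = some false ∧ o2 = some true)

def MonoM (M M' : List (Option Bool)) : Prop := List.Forall₂ leB M M'

def noneCount (M : List (Option Bool)) : Nat := M.countP (fun o => o.isNone)

theorem leB_refl (o : Option Bool) : leB o o := Or.inr (Or.inl rfl)

theorem leB_trans {o1 o2 o3 : Option Bool} (h1 : leB o1 o2) (h2 : leB o2 o3) : leB o1 o3 := by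
  rcases h1 with h1 | h1 | ⟨h1, h1'⟩ <;> rcases h2 with h2 | h2 | ⟨h2, h2'⟩ <;>
    simp_all [leB]

theorem leB_ne_none {o1 o2 : Option Bool} (h : leB o1 o2) (h1 : o1 ≠ none) : o2 ≠ none := by
  rcases h with h | h | ⟨h, h'⟩ <;> simp_all

theorem leB_some_true {o2 : Option Bool} (h : leB (some true) o2) : o2 = some true := by
  rcases h with h | h | ⟨h, h'⟩ <;> simp_all

theorem monoM_refl (M : List (Option Bool)) : MonoM M M :=
  List.forall₂_same.mpr (fun o _ => leB_refl o)

theorem monoM_length {M M' : List (Option Bool)} (h : MonoM M M') : M.length = M'.length :=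
  h.length_eq

theorem monoM_mget {M M' : List (Option Bool)} (h : MonoM M M') (j : Nat) :
    leB (mget M j) (mget M' j) := by
  rcases List.forall₂_iff_get.mp h with ⟨hl, hp⟩
  by_cases hj : j < M.length
  · have := hp j hj (hl ▸ hj)
    simp only [List.get_eq_getElem] at this
    rw [mget, mget, List.getD_eq_getElem _ _ hj, List.getD_eq_getElem _ _ (hl ▸ hj)]
    exact this
  · have h1 : mget M j = none := by
      rw [mget, List.getD_eq_getElem?_getD, List.getElem?_eq_none (by omega)]
      rfl
    exact Or.inl h1

theorem monoM_trans {M1 M2 M3 : List (Option Bool)} (h1 : MonoM M1 M2) (h2 : MonoM M2 M3) :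
    MonoM M1 M3 := by
  rcases List.forall₂_iff_get.mp h1 with ⟨hl1, hp1⟩
  rcases List.forall₂_iff_get.mp h2 with ⟨hl2, hp2⟩
  exact List.forall₂_iff_get.mpr ⟨hl1.trans hl2,
    fun i hi1 hi3 => leB_trans (hp1 i hi1 (hl1 ▸ hi1)) (hp2 i (hl1 ▸ hi1) hi3)⟩

theorem noneCount_le_of_mono {M M' : List (Option Bool)} (h : MonoM M M') :
    noneCount M' ≤ noneCount M := by
  induction h with
  | nil => simp [noneCount]
  | @cons o1 o2 l1 l2 hab htail ih =>
    have h2 : o2.isNone = true → o1.isNone = true := by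
      rcases hab with h1 | h1 | ⟨h1, h1'⟩ <;> simp_all
    simp only [noneCount, List.countP_cons] at *
    cases ho2 : o2.isNone <;> cases ho1 : o1.isNone <;> simp_all <;> omega

theorem noneCount_le_length (M : List (Option Bool)) : noneCount M ≤ M.length :=
  List.countP_le_length

theorem mget_set (M : List (Option Bool)) (k : Nat) (v : Option Bool) (j : Nat) :
    mget (M.set k v) j = if j = k ∧ k < M.length then v else mget M j := by
  simp only [mget, List.getD_eq_getElem?_getD, List.getElem?_set]
  by_cases hjk : j = k
  · subst hjk
    by_cases hk : j < M.length <;> simp [hk]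
  · rw [if_neg (fun h : k = j => hjk h.symm)]; simp [hjk]

theorem noneCount_set_lt (M : List (Option Bool)) (k : Nat) (v : Bool)
    (hk : k < M.length) (hnone : mget M k = none) :
    noneCount (M.set k (some v)) < noneCount M := by
  induction M generalizing k with
  | nil => simp at hk
  | cons o t ih =>
    cases k with
    | zero =>
      cases o with
      | some v' => simp [mget] at hnone
      | none => simp [noneCount]
    | succ k =>
      have := ih k (by simpa using hk) (by simpa [mget] using hnone)
      simp only [noneCount, List.set_cons_succ, List.countP_cons] at *
      omega

theorem monoM_set_of_none {M : List (Option Bool)} {k : Nat} (hnone : mget M k = none)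
    (v : Option Bool) : MonoM M (M.set k v) := by
  refine List.forall₂_iff_get.mpr ⟨by simp, fun i hi hi' => ?_⟩
  have h1 := mget_set M k v i
  by_cases hik : i = k
  · subst hik
    simp only [List.get_eq_getElem]
    rw [← List.getD_eq_getElem _ none hi, ← List.getD_eq_getElem _ none hi']
    rw [show (M.set i v).getD i none = mget (M.set i v) i from rfl, h1, if_pos ⟨rfl, hi⟩]
    exact Or.inl hnone
  · simp only [List.get_eq_getElem]
    rw [List.getElem_set_ne (by omega)]
    exact leB_refl _

theorem monoM_set_true {M : List (Option Bool)} {k : Nat}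
    (h : mget M k = some false ∨ mget M k = some true) : MonoM M (M.set k (some true)) := by
  refine List.forall₂_iff_get.mpr ⟨by simp, fun i hi hi' => ?_⟩
  by_cases hik : i = k
  · subst hik
    simp only [List.get_eq_getElem]
    rw [List.getElem_set_self (h := hi')]
    have hmm : M[i] = mget M i := by rw [mget, List.getD_eq_getElem _ _ hi]
    rcases h with h | h <;> rw [hmm, h]
    · exact Or.inr (Or.inr ⟨rfl, rfl⟩)
    · exact Or.inr (Or.inl rfl)
  · simp only [List.get_eq_getElem]
    rw [List.getElem_set_ne (by omega)]
    exact leB_refl _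

-- ===== binary search =====
theorem pyGetD_toNat {α : Type} (xs : List α) {i : Int} (d : α) (h : 0 ≤ i) :
    PySem.List.pyGetD xs i d = xs.getD i.toNat d := by
  have h2 : i = ((i.toNat : Nat) : Int) := by omega
  rw [h2, PySem.List.pyGetD_natCast, Int.toNat_natCast]

theorem pymget {f : List (Option Bool)} {i : Int} (h : 0 ≤ i) :
    PySem.List.pyGetD f i none = mget f i.toNat := by
  rw [pyGetD_toNat f none h]; rfl

theorem pyqget {Q : List (Int × Int)} {i : Int} (h : 0 ≤ i) :
    PySem.List.pyGetD Q i (0, 0) = qget Q i.toNat := by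
  rw [pyGetD_toNat Q (0, 0) h]; rfl

theorem pairwise_fst_mono {Q : List (Int × Int)}
    (hQ : Q.Pairwise (fun p q => p.1 ≤ q.1)) {j k : Nat} (hjk : j ≤ k) (hk : k < Q.length) :
    (qget Q j).1 ≤ (qget Q k).1 := by
  rcases Nat.lt_or_ge j k with hlt | hge
  · have := List.pairwise_iff_getElem.mp hQ j k (by omega) hk hlt
    rw [qget, qget, List.getD_eq_getElem _ _ (show j < Q.length by omega),
      List.getD_eq_getElem _ _ hk]
    exact this
  · have : j = k := by omega
    subst this; exact le_refl _

theorem bs2Go_spec {Q : List (Int × Int)} (hQ : Q.Pairwise (fun p q => p.1 ≤ q.1)) (v : Int) :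
    ∀ s e : Int, 0 ≤ s → s ≤ e + 1 → e < (Q.length : Int) →
    (∀ j : Nat, (j : Int) < s → j < Q.length → (qget Q j).1 < v) →
    (∀ j : Nat, e < (j : Int) → j < Q.length → v ≤ (qget Q j).1) →
    0 ≤ bs2Go Q v s e ∧ bs2Go Q v s e ≤ (Q.length : Int) ∧
      (∀ j : Nat, (j : Int) < bs2Go Q v s e → j < Q.length → (qget Q j).1 < v) ∧
      (∀ j : Nat, bs2Go Q v s e ≤ (j : Int) → j < Q.length → v ≤ (qget Q j).1) := by
  intro s e
  induction s, e using bs2Go.induct Q v with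
  | case1 s e hse hgt ih =>
    intro hs0 _ hen hlow hhigh
    have hb : s ≤ midPt s e ∧ midPt s e ≤ e := by
      simpa [midPt] using PySem.Int.floordiv_two_mid_bounds hse
    set mid := midPt s e with hmid
    rw [bs2Go, dif_pos hse, ← hmid, if_pos hgt]
    rw [pyGetD_toNat Q (0, 0) (by omega)] at hgt
    replace hgt : v > (qget Q mid.toNat).1 := hgt
    refine ih (by omega) (by omega) hen (fun j hj hjn => ?_) hhigh
    have hle : (qget Q j).1 ≤ (qget Q mid.toNat).1 :=
      pairwise_fst_mono hQ (by omega) (by omega)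
    omega
  | case2 s e hse hgt ih =>
    intro hs0 _ hen hlow hhigh
    have hb : s ≤ midPt s e ∧ midPt s e ≤ e := by
      simpa [midPt] using PySem.Int.floordiv_two_mid_bounds hse
    set mid := midPt s e with hmid
    rw [bs2Go, dif_pos hse, ← hmid, if_neg hgt]
    rw [pyGetD_toNat Q (0, 0) (by omega)] at hgt
    replace hgt : ¬ v > (qget Q mid.toNat).1 := hgt
    refine ih hs0 (by omega) (by omega) hlow (fun j hj hjn => ?_)
    have hle : (qget Q mid.toNat).1 ≤ (qget Q j).1 :=
      pairwise_fst_mono hQ (by omega) hjn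
    omega
  | case3 s e hse =>
    intro hs0 hse1 hen hlow hhigh
    rw [bs2Go, dif_neg hse]
    exact ⟨hs0, by omega, hlow, fun j hj hjn => hhigh j (by omega) hjn⟩

theorem bs2_neg {Q : List (Int × Int)} (hQ : Q.Pairwise (fun p q => p.1 ≤ q.1)) {v : Int}
    (h : binarySearch2 Q v = -1) : ∀ j : Nat, j < Q.length → (qget Q j).1 ≠ v := by
  have hs := bs2Go_spec hQ v 0 ((Q.length : Int) - 1) (by omega) (by omega) (by omega)
    (by intro j hj _; omega) (by intro j hj hjn; omega)
  rcases hs with ⟨h0, hle, hlow, hhigh⟩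
  rw [binarySearch2] at h
  set st := bs2Go Q v 0 ((Q.length : Int) - 1) with hst
  by_cases hcond : st < (Q.length : Int) ∧ (PySem.List.pyGetD Q st (0, 0)).1 = v
  · rw [if_pos hcond] at h; omega
  · intro j hjn hv
    rcases Nat.lt_or_ge j st.toNat with hlt | hge
    · exact absurd hv (ne_of_lt (hlow j (by omega) hjn))
    · have hjv := hhigh j (by omega) hjn
      have hstn : st < (Q.length : Int) := by omega
      have hstv := hhigh st.toNat (by omega) (by omega)
      have hmono := pairwise_fst_mono hQ hge hjn
      rw [pyGetD_toNat Q (0, 0) h0] at hcond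
      have : (qget Q st.toNat).1 = v := by omega
      exact hcond ⟨hstn, this⟩

theorem bs2_pos {Q : List (Int × Int)} (hQ : Q.Pairwise (fun p q => p.1 ≤ q.1)) {v : Int}
    (h : binarySearch2 Q v ≠ -1) :
    0 ≤ binarySearch2 Q v ∧ binarySearch2 Q v < (Q.length : Int) ∧
      (∀ j : Nat, (j : Int) < binarySearch2 Q v → j < Q.length → (qget Q j).1 < v) ∧
      (∀ j : Nat, binarySearch2 Q v ≤ (j : Int) → j < Q.length → v ≤ (qget Q j).1) := by
  have hs := bs2Go_spec hQ v 0 ((Q.length : Int) - 1) (by omega) (by omega) (by omega)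
    (by intro j hj _; omega) (by intro j hj hjn; omega)
  rcases hs with ⟨h0, hle, hlow, hhigh⟩
  rw [binarySearch2] at h ⊢
  set st := bs2Go Q v 0 ((Q.length : Int) - 1) with hst
  by_cases hcond : st < (Q.length : Int) ∧ (PySem.List.pyGetD Q st (0, 0)).1 = v
  · rw [if_pos hcond]
    exact ⟨h0, hcond.1, hlow, hhigh⟩
  · rw [if_neg hcond] at h; exact absurd rfl h

-- ===== semantics of rek =====
def goodT (Q : List (Int × Int)) (b : Int) (M : List (Option Bool)) : Prop :=
  ∀ j, j < Q.length → mget M j = some true → RB Q b (qget Q j).2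

def noTrue (M : List (Option Bool)) : Prop := ∀ j, mget M j ≠ some true

def CE (Q : List (Int × Int)) (b : Int) (M : List (Option Bool)) (G : Nat → Prop) : Prop :=
  ∀ k, k < Q.length → mget M k = some false → ¬ G k →
    (qget Q k).2 ≠ b ∧ ∀ j, j < Q.length → (qget Q j).1 = (qget Q k).2 → mget M j ≠ none

def RekPost (Q : List (Int × Int)) (b : Int) (i : Int) (M : List (Option Bool))
    (res : Bool × List (Option Bool)) : Prop :=
  MonoM M res.2 ∧ mget res.2 i.toNat ≠ none ∧ (res.1 = true ↔ mget res.2 i.toNat = some true) ∧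
  (goodT Q b M → goodT Q b res.2) ∧ (∀ G, CE Q b M G → CE Q b res.2 G) ∧
  (noTrue M → res.1 = false → noTrue res.2)

def RekWPost (Q : List (Int × Int)) (b : Int) (i : Int) (v : Int) (M M' : List (Option Bool)) :
    Prop :=
  MonoM M M' ∧ (∀ j, j < Q.length → (qget Q j).1 = v → mget M' j ≠ none) ∧
  (goodT Q b M → goodT Q b M') ∧ (∀ G, CE Q b M G → CE Q b M' G) ∧
  (noTrue M → mget M' i.toNat ≠ some true → noTrue M')

theorem qget_mem {Q : List (Int × Int)} {j : Nat} (h : j < Q.length) : qget Q j ∈ Q := by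
  rw [qget, List.getD_eq_getElem _ _ h]; exact List.getElem_mem _

theorem leB_some {o o' : Option Bool} (h : leB o o')
    (ho : o = some false ∨ o = some true) : o' = some false ∨ o' = some true := by
  rcases h with h | h | ⟨h, h'⟩ <;> rcases ho with ho | ho <;> simp_all

theorem goodT_set_false {Q : List (Int × Int)} {b : Int} {M : List (Option Bool)} {k : Nat}
    (h : goodT Q b M) : goodT Q b (M.set k (some false)) := by
  intro j hj hjt
  rw [mget_set] at hjt
  split_ifs at hjt with hc
  · simp at hjt
  · exact h j hj hjt

theorem noTrue_set_false {M : List (Option Bool)} {k : Nat} (h : noTrue M) :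
    noTrue (M.set k (some false)) := by
  intro j
  rw [mget_set]
  split_ifs with hc
  · simp
  · exact h j

theorem CE_set_false {Q : List (Int × Int)} {b : Int} {M : List (Option Bool)} {G : Nat → Prop}
    {k : Nat} (hce : CE Q b M G) (hGk : G k) : CE Q b (M.set k (some false)) G := by
  intro k' hk' hfalse hG
  rw [mget_set] at hfalse
  split_ifs at hfalse with hc
  · exact absurd hGk (by rcases hc with ⟨hc, _⟩; subst hc; exact hG)
  · rcases hce k' hk' hfalse hG with ⟨hb, hch⟩
    refine ⟨hb, fun j hj hfst => ?_⟩
    rw [mget_set]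
    split_ifs with hc2
    · simp
    · exact hch j hj hfst

theorem CE_set_true {Q : List (Int × Int)} {b : Int} {M : List (Option Bool)} {G : Nat → Prop}
    {k : Nat} (hce : CE Q b M G) : CE Q b (M.set k (some true)) G := by
  intro k' hk' hfalse hG
  rw [mget_set] at hfalse
  split_ifs at hfalse with hc
  · simp at hfalse
  · rcases hce k' hk' hfalse hG with ⟨hb, hch⟩
    refine ⟨hb, fun j hj hfst => ?_⟩
    rw [mget_set]
    split_ifs with hc2
    · simp
    · exact hch j hj hfst

theorem goodT_set_true {Q : List (Int × Int)} {b : Int} {M : List (Option Bool)} {k : Nat}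
    (h : goodT Q b M) (hk : k < Q.length → RB Q b (qget Q k).2) :
    goodT Q b (M.set k (some true)) := by
  intro j hj hjt
  rw [mget_set] at hjt
  split_ifs at hjt with hc
  · rcases hc with ⟨hc, _⟩; subst hc; exact hk hj
  · exact h j hj hjt

theorem monoM_ne_none {M M' : List (Option Bool)} (h : MonoM M M') {j : Nat}
    (hj : mget M j ≠ none) : mget M' j ≠ none := leB_ne_none (monoM_mget h j) hj

theorem rek_main {Q : List (Int × Int)} {b : Int} (hQ : Q.Pairwise (fun p q => p.1 ≤ q.1)) :
    ∀ (fuel : Nat) (i : Int) (f : List (Option Bool)),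
      f.length = Q.length → noneCount f < fuel → 0 ≤ i → i < (Q.length : Int) →
      RekPost Q b i f (rek Q b fuel i f) := by
  intro fuel i f
  induction fuel, i, f using rek.induct Q b
    (motive2 := fun fuel i v x f =>
      f.length = Q.length → noneCount f < fuel → 0 ≤ i → i < (Q.length : Int) →
      (qget Q i.toNat).2 = v →
      (mget f i.toNat = some false ∨ mget f i.toNat = some true) → 0 ≤ x →
      (∀ j, j < Q.length → (qget Q j).1 = v → (j : Int) < x → mget f j ≠ none) →
      (∀ j, j < Q.length → x ≤ (j : Int) → v ≤ (qget Q j).1) →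
      RekWPost Q b i v f (rekW Q b fuel i v x f)) with
  | case1 i f =>
    intro _ hfc _ _
    exact absurd hfc (Nat.not_lt_zero _)
  | case2 i f fuel v hmemo =>
    intro hM hfc hi0 hin
    have he : rek Q b (fuel + 1) i f = (v, f) := by
      rw [rek.eq_def]; simp [hmemo]
    rw [he]
    have hv : mget f i.toNat = some v := by rw [← pymget hi0]; exact hmemo
    refine ⟨monoM_refl f, by simp [hv], ?_, fun h => h, fun G h => h, ?_⟩
    · cases v <;> simp [hv]
    · intro hnt _; exact hnt
  | case3 i f fuel hmemo hhit =>
    intro hM hfc hi0 hin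
    have he : rek Q b (fuel + 1) i f = (true, PySem.List.pySetD f i (some true)) := by
      rw [rek.eq_def]; simp [hmemo, hhit]
    rw [he, PySem.List.pySetD_of_nonneg f _ hi0]
    have hitn : i.toNat < f.length := by omega
    have hnone : mget f i.toNat = none := by rw [← pymget hi0]; exact hmemo
    have hset : mget (f.set i.toNat (some true)) i.toNat = some true := by
      rw [mget_set, if_pos ⟨rfl, hitn⟩]
    have hb2 : (qget Q i.toNat).2 = b := by
      rw [← pyqget hi0]; exact hhit
    refine ⟨monoM_set_of_none hnone _, by simp [hset], by simp [hset], ?_, ?_, ?_⟩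
    · exact fun h => goodT_set_true h (fun _ => by rw [hb2]; exact RB.base)
    · exact fun G h => CE_set_true h
    · intro _ hr; simp at hr
  | case4 i f fuel hmemo hhit hbs =>
    intro hM hfc hi0 hin
    have he : rek Q b (fuel + 1) i f = (false, PySem.List.pySetD f i (some false)) := by
      rw [rek.eq_def]; simp [hmemo, hhit, hbs]
    rw [he, PySem.List.pySetD_of_nonneg f _ hi0]
    have hitn : i.toNat < f.length := by omega
    have hnone : mget f i.toNat = none := by rw [← pymget hi0]; exact hmemo
    have hset : mget (f.set i.toNat (some false)) i.toNat = some false := by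
      rw [mget_set, if_pos ⟨rfl, hitn⟩]
    have hnb : (qget Q i.toNat).2 ≠ b := by
      rw [← pyqget hi0]; exact hhit
    have hnoch := bs2_neg hQ hbs
    refine ⟨monoM_set_of_none hnone _, by simp [hset], by simp [hset], ?_, ?_, ?_⟩
    · exact fun h => goodT_set_false h
    · intro G hce k hk hfalse hG
      rw [mget_set] at hfalse
      split_ifs at hfalse with hc
      · rcases hc with ⟨hc, _⟩
        subst hc
        refine ⟨hnb, fun j hj hfst => ?_⟩
        rw [← pyqget hi0] at hfst
        exact absurd hfst (hnoch j hj)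
      · rcases hce k hk hfalse hG with ⟨hkb, hch⟩
        refine ⟨hkb, fun j hj hfst => ?_⟩
        rw [mget_set]
        split_ifs with hc2
        · simp
        · exact hch j hj hfst
    · intro hnt _; exact noTrue_set_false hnt
  | case5 i f fuel hmemo hhit hbs ih2 =>
    intro hM hfc hi0 hin
    have hitn : i.toNat < f.length := by omega
    have hnone : mget f i.toNat = none := by rw [← pymget hi0]; exact hmemo
    have hqv : (qget Q i.toNat).2 = (PySem.List.pyGetD Q i (0, 0)).2 := by
      rw [← pyqget hi0]
    rcases bs2_pos hQ hbs with ⟨hx0, hxn, hlow, hhigh⟩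
    rw [PySem.List.pySetD_of_nonneg f _ hi0] at ih2
    have hset : mget (f.set i.toNat (some false)) i.toNat = some false := by
      rw [mget_set, if_pos ⟨rfl, hitn⟩]
    have hW := ih2 (by simpa using hM)
      (by have := noneCount_set_lt f i.toNat false hitn hnone; omega)
      hi0 hin hqv (Or.inl hset) hx0
      (by
        intro j hj hfst hjx
        exact absurd hfst (ne_of_lt (hlow j hjx hj)))
      (fun j hj hxj => hhigh j hxj hj)
    rcases hW with ⟨hmono, hblock, hgood, hce, hnt⟩
    have he : rek Q b (fuel + 1) i f =
        rekRet (rekW Q b fuel i (PySem.List.pyGetD Q i (0, 0)).2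
          (binarySearch2 Q (PySem.List.pyGetD Q i (0, 0)).2)
          (PySem.List.pySetD f i (some false))) i := by
      rw [rek.eq_def]; simp [hmemo, hhit, hbs]
    rw [he]
    rw [PySem.List.pySetD_of_nonneg f _ hi0]
    set M2 := rekW Q b fuel i (PySem.List.pyGetD Q i (0, 0)).2
      (binarySearch2 Q (PySem.List.pyGetD Q i (0, 0)).2) (f.set i.toNat (some false)) with hM2
    have hi_entry : mget M2 i.toNat = some false ∨ mget M2 i.toNat = some true :=
      leB_some (monoM_mget hmono i.toNat) (Or.inl hset)
    have hretm : (rekRet M2 i).2 = M2 := rfl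
    have hretr : (rekRet M2 i).1 = (mget M2 i.toNat).getD false := by
      simp only [rekRet, pymget hi0]
      rcases hi_entry with h | h <;> simp [h]
    have hnb : (qget Q i.toNat).2 ≠ b := by
      rw [← pyqget hi0]; exact hhit
    refine ⟨monoM_trans (monoM_set_of_none hnone _) hmono, ?_, ?_, ?_, ?_, ?_⟩
    · rw [hretm]; rcases hi_entry with h | h <;> simp [h]
    · rw [hretm, hretr]; rcases hi_entry with h | h <;> simp [h]
    · intro hg
      rw [hretm]
      exact hgood (goodT_set_false hg)
    · intro G hceG
      rw [hretm]
      intro k hk hfalse hG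
      by_cases hki : k = i.toNat
      · subst hki
        refine ⟨hnb, fun j hj hfst => ?_⟩
        exact hblock j hj (by rw [hfst, hqv.symm])
      · have hceG' : CE Q b (f.set i.toNat (some false)) (fun k => G k ∨ k = i.toNat) := by
          have : CE Q b f (fun k => G k ∨ k = i.toNat) := by
            intro k' hk' hf hG'
            rcases hceG k' hk' hf (fun h => hG' (Or.inl h)) with ⟨h1, h2⟩
            exact ⟨h1, h2⟩
          exact CE_set_false this (Or.inr rfl)
        rcases hce _ hceG' k hk hfalse (by tauto) with ⟨h1, h2⟩
        exact ⟨h1, h2⟩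
    · intro hntf hr
      rw [hretm]
      rw [hretr] at hr
      refine hnt (noTrue_set_false hntf) ?_
      rcases hi_entry with h | h
      · simp [h]
      · simp [h] at hr
  | case6 fuel i v x f hcond ih1 ih2 hM hfc hi0 hin hqv hient hx0 hmark hge =>
    have hxn : x < (Q.length : Int) := hcond.1
    have hfst : (qget Q x.toNat).1 = v := by
      rw [← pyqget hx0]; exact hcond.2
    simp only [dite_eq_ite] at ih2
    have hR := ih1 hM hfc hx0 hxn
    rcases hR with ⟨hmono1, hne1, hiff1, hgood1, hce1, hnt1⟩
    set M1 := (rek Q b fuel x f).2 with hM1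
    set r := (rek Q b fuel x f).1 with hr
    have hM1len : M1.length = Q.length := by rw [← monoM_length hmono1]; exact hM
    have hient1 : mget M1 i.toNat = some false ∨ mget M1 i.toNat = some true :=
      leB_some (monoM_mget hmono1 i.toNat) hient
    set fnext := if r = true then PySem.List.pySetD M1 i (some true) else M1 with hfnext
    have hfnext_eq : fnext = if r = true then M1.set i.toNat (some true) else M1 := by
      rw [hfnext, PySem.List.pySetD_of_nonneg M1 _ hi0]
    have hmono2 : MonoM M1 fnext := by
      rw [hfnext_eq]
      split_ifs
      · exact monoM_set_true hient1
      · exact monoM_refl M1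
    have hient2 : mget fnext i.toNat = some false ∨ mget fnext i.toNat = some true :=
      leB_some (monoM_mget hmono2 i.toNat) hient1
    have hfnlen : fnext.length = Q.length := by rw [← monoM_length hmono2]; exact hM1len
    have he : rekW Q b fuel i v x f = rekW Q b fuel i v (x + 1) fnext := by
      rw [rekW.eq_def]
      rw [dif_pos hcond]
    have hW := ih2 hfnlen
      (by
        have h1 := noneCount_le_of_mono hmono1
        have h2 := noneCount_le_of_mono hmono2
        omega)
      hi0 hin hqv hient2 (by omega)
      (by
        intro j hj hjfst hjx
        by_cases hjx' : (j : Int) < x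
        · exact monoM_ne_none hmono2 (monoM_ne_none hmono1 (hmark j hj hjfst hjx'))
        · have : j = x.toNat := by omega
          subst this
          exact monoM_ne_none hmono2 hne1)
      (fun j hj hxj => hge j hj (by omega))
    rcases hW with ⟨hmonoW, hblockW, hgoodW, hceW, hntW⟩
    rw [he]
    refine ⟨monoM_trans hmono1 (monoM_trans hmono2 hmonoW), hblockW, ?_, ?_, ?_⟩
    · intro hg
      have hg1 := hgood1 hg
      refine hgoodW ?_
      rw [hfnext_eq]
      split_ifs with hrt
      · refine goodT_set_true hg1 (fun _ => ?_)
        have hxt : mget M1 x.toNat = some true := hiff1.mp hrt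
        have hRBx : RB Q b (qget Q x.toNat).2 := hg1 x.toNat (by omega) hxt
        rw [hqv, ← hfst]
        have hmem : ((qget Q x.toNat).1, (qget Q x.toNat).2) ∈ Q := by
          rw [Prod.mk.eta]; exact qget_mem (by omega)
        exact RB.step hmem hRBx
      · exact hg1
    · intro G hceG
      refine hceW G ?_
      rw [hfnext_eq]
      split_ifs
      · exact CE_set_true (hce1 G hceG)
      · exact hce1 G hceG
    · intro hntf hni
      by_cases hrt : r = true
      · exfalso
        have hft : mget fnext i.toNat = some true := by
          rw [hfnext_eq, if_pos hrt, mget_set, if_pos ⟨rfl, by omega⟩]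
        have hleb := monoM_mget hmonoW i.toNat
        rw [hft] at hleb
        exact hni (leB_some_true hleb)
      · have hnt1' := hnt1 hntf (by simpa using hrt)
        have heq : fnext = M1 := by rw [hfnext_eq, if_neg hrt]
        exact hntW (by rw [heq]; exact hnt1') hni
  | case7 fuel i v x f hcond hM hfc hi0 hin hqv hient hx0 hmark hge =>
    have he : rekW Q b fuel i v x f = f := by
      rw [rekW.eq_def, dif_neg hcond]
    rw [he]
    refine ⟨monoM_refl f, ?_, fun h => h, fun G h => h, fun h _ => h⟩
    intro j hj hjfst
    by_cases hjx : (j : Int) < x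
    · exact hmark j hj hjfst hjx
    · exfalso
      rcases not_and_or.mp hcond with hxn | hfstx
      · omega
      · have hxn : x < (Q.length : Int) := by omega
        have hxv : v ≤ (qget Q x.toNat).1 := hge x.toNat (by omega) (by omega)
        have hfx : (qget Q x.toNat).1 ≠ v := by
          rw [← pyqget hx0]; exact hfstx
        have hmono := pairwise_fst_mono hQ (show x.toNat ≤ j by omega) hj
        have : v < (qget Q j).1 := by omega
        omega

-- ===== outer loop and A-side characterization =====
def AnsA (Q : List (Int × Int)) (a b : Int) : Prop :=
  ∃ j, j < Q.length ∧ (qget Q j).1 = a ∧ RB Q b (qget Q j).2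

theorem noPath {Q : List (Int × Int)} {a b : Int} {M : List (Option Bool)}
    (hnt : noTrue M) (hce : CE Q b M (fun _ => False))
    (hmarked : ∀ j, j < Q.length → (qget Q j).1 = a → mget M j ≠ none) : ¬ AnsA Q a b := by
  rintro ⟨j0, hj0, hfst, hRB⟩
  have key : ∀ v, RB Q b v → ∀ k, k < Q.length → mget M k = some false → (qget Q k).2 = v →
      False := by
    intro v hv
    induction hv with
    | base =>
      intro k hk hfalse h2
      exact (hce k hk hfalse not_false).1 h2
    | @step u w hmem hrb ih =>
      intro k hk hfalse h2
      rcases List.mem_iff_getElem.mp hmem with ⟨j1, hj1, hEq⟩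
      have hq1 : qget Q j1 = (u, w) := by rw [qget, List.getD_eq_getElem _ _ hj1]; exact hEq
      have hne := (hce k hk hfalse not_false).2 j1 hj1 (by rw [hq1, h2])
      have hfalse1 : mget M j1 = some false := by
        rcases hmb : mget M j1 with _ | bv
        · exact absurd hmb hne
        · cases bv
          · rfl
          · exact absurd hmb (hnt j1)
      exact ih j1 hj1 hfalse1 (by rw [hq1])
  have hmj : mget M j0 ≠ none := hmarked j0 hj0 hfst
  have hfalse : mget M j0 = some false := by
    rcases hmb : mget M j0 with _ | bv
    · exact absurd hmb hmj
    · cases bv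
      · rfl
      · exact absurd hmb (hnt j0)
  exact key _ hRB j0 hj0 hfalse rfl

theorem outer_main {Q : List (Int × Int)} {a b : Int}
    (hQ : Q.Pairwise (fun p q => p.1 ≤ q.1)) :
    ∀ (i : Int) (f : List (Option Bool)), 0 ≤ i → f.length = Q.length → goodT Q b f →
      (outerLoop Q a b i f = true → AnsA Q a b) ∧
      (outerLoop Q a b i f = false → noTrue f → CE Q b f (fun _ => False) →
        (∀ j, j < Q.length → (qget Q j).1 = a → (j : Int) < i → mget f j ≠ none) →
        (∀ j, j < Q.length → i ≤ (j : Int) → a ≤ (qget Q j).1) → ¬ AnsA Q a b) := by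
  intro i f
  induction i, f using outerLoop.induct Q a b with
  | case1 i f hcond htrue =>
    intro hi0 hM hgood
    have he : outerLoop Q a b i f = true := by
      rw [outerLoop.eq_def, dif_pos hcond, if_pos htrue]
    rcases rek_main hQ (Q.length + 1) i f hM (by have := noneCount_le_length f; omega) hi0
      hcond.1 with ⟨hmono, hne, hiff, hgoodR, hceR, hntR⟩
    constructor
    · intro _
      have htt : mget (rek Q b (Q.length + 1) i f).2 i.toNat = some true := hiff.mp htrue
      exact ⟨i.toNat, by omega, by rw [← pyqget hi0]; exact hcond.2,
        hgoodR hgood i.toNat (by omega) htt⟩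
    · intro hfalse
      rw [he] at hfalse
      exact absurd hfalse (by simp)
  | case2 i f hcond hrfalse ih =>
    intro hi0 hM hgood
    rcases rek_main hQ (Q.length + 1) i f hM (by have := noneCount_le_length f; omega) hi0
      hcond.1 with ⟨hmono, hne, hiff, hgoodR, hceR, hntR⟩
    have he : outerLoop Q a b i f =
        outerLoop Q a b (i + 1) (rek Q b (Q.length + 1) i f).2 := by
      rw [outerLoop.eq_def, dif_pos hcond, if_neg hrfalse]
    have hM1 : (rek Q b (Q.length + 1) i f).2.length = Q.length := by
      rw [← monoM_length hmono]; exact hM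
    rcases ih (by omega) hM1 (hgoodR hgood) with ⟨ih1, ih2⟩
    constructor
    · intro ht; rw [he] at ht; exact ih1 ht
    · intro hfalse hnt hce hmark hge
      rw [he] at hfalse
      refine ih2 hfalse (hntR hnt (by simpa using hrfalse)) (hceR _ hce) ?_
        (fun j hj hij => hge j hj (by omega))
      intro j hj hjfst hji
      by_cases hji' : (j : Int) < i
      · exact monoM_ne_none hmono (hmark j hj hjfst hji')
      · have : j = i.toNat := by omega
        subst this
        exact hne
  | case3 i f hcond =>
    intro hi0 hM hgood
    have he : outerLoop Q a b i f = false := by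
      rw [outerLoop.eq_def, dif_neg hcond]
    constructor
    · intro ht; rw [he] at ht; exact absurd ht (by simp)
    · intro _ hnt hce hmark hge
      refine noPath hnt hce ?_
      intro j hj hjfst
      rcases not_and_or.mp hcond with hin | hfsta
      · exact hmark j hj hjfst (by omega)
      · by_cases hji : (j : Int) < i
        · exact hmark j hj hjfst hji
        · exfalso
          have hiln : i < (Q.length : Int) := by omega
          have h1 : a ≤ (qget Q i.toNat).1 := hge i.toNat (by omega) (by omega)
          have h2 : (qget Q i.toNat).1 ≠ a := by rw [← pyqget hi0]; exact hfsta
          have h3 := pairwise_fst_mono hQ (show i.toNat ≤ j by omega) hj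
          omega

theorem insertBy_pairwise_fst {R : Int × Int → Int × Int → Prop} {before : Int × Int → Int × Int → Bool}
    (htrans : Transitive R)
    (hT : ∀ p q, before p q = true → R p q) (hF : ∀ p q, before p q = false → R q p)
    (x : Int × Int) : ∀ ys : List (Int × Int), ys.Pairwise R →
      (PySem.List.insertBy before x ys).Pairwise R := by
  intro ys
  induction ys with
  | nil => intro _; simp [PySem.List.insertBy]
  | cons y ys ih =>
    intro hp
    rcases List.pairwise_cons.mp hp with ⟨hy, hys⟩
    rw [PySem.List.insertBy]
    split
    case isTrue hb =>
      refine List.pairwise_cons.mpr ⟨?_, hp⟩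
      intro z hz
      rcases List.mem_cons.mp hz with hz | hz
      · subst hz; exact hT _ _ hb
      · exact htrans (hT _ _ hb) (hy z hz)
    case isFalse hb =>
      refine List.pairwise_cons.mpr ⟨?_, ih hys⟩
      intro z hz
      rcases (PySem.List.mem_insertBy before x z ys).mp hz with hz | hz
      · subst hz; exact hF _ _ (Bool.not_eq_true _ ▸ eq_false_of_ne_true hb)
      · exact hy z hz

theorem sorted2_pairwise_fst (xs : List (Int × Int)) :
    (PySem.List.sorted2 xs Prod.fst Prod.snd).Pairwise (fun p q => p.1 ≤ q.1) := by
  show (List.foldl _ [] xs).Pairwise _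
  suffices h : ∀ (l : List (Int × Int)) (acc : List (Int × Int)),
      acc.Pairwise (fun p q : Int × Int => p.1 ≤ q.1) →
      (List.foldl (fun acc x => PySem.List.insertBy
        (fun a b => decide (a.1 < b.1) || (!decide (b.1 < a.1) && decide (a.2 < b.2))) x acc)
        acc l).Pairwise (fun p q : Int × Int => p.1 ≤ q.1) by
    exact h xs [] (by simp)
  intro l
  induction l with
  | nil => intro acc h; exact h
  | cons x l ih =>
    intro acc h
    refine ih _ (insertBy_pairwise_fst ?_ ?_ ?_ x acc h)
    · intro p q r h1 h2; omega
    · intro p q hb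
      simp only [Bool.or_eq_true, Bool.and_eq_true, Bool.not_eq_eq_eq_not, Bool.not_true,
        decide_eq_true_eq, decide_eq_false_iff_not] at hb
      rcases hb with hb | ⟨hb, _⟩ <;> omega
    · intro p q hb
      simp only [Bool.or_eq_false_iff, Bool.and_eq_false_iff, Bool.not_eq_eq_eq_not,
        decide_eq_false_iff_not] at hb
      have := hb.1
      omega

theorem pyGetD_neg_one {Q : List (Int × Int)} (h : 0 < Q.length) :
    PySem.List.pyGetD Q (-1) (0, 0) = qget Q (Q.length - 1) := by
  have h1 : PySem.List.pyIdx? Q.length (-1) = some (Q.length - 1) := by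
    rw [PySem.List.pyIdx?]
    rw [if_neg (by omega), if_pos (by omega)]
    norm_num
  rw [PySem.List.pyGetD, PySem.List.pyGet?, h1]
  simp only [Option.bind_some]
  rw [List.getElem?_eq_getElem (by omega)]
  rw [qget, List.getD_eq_getElem _ _ (by omega)]
  rfl

theorem mget_replicate (n j : Nat) : mget (List.replicate n (none : Option Bool)) j = none := by
  rw [mget, List.getD_eq_getElem?_getD, List.getElem?_replicate]
  split_ifs <;> rfl

theorem sklejanie_charA (P : List (Int × Int)) (a b : Int) (hne : P ≠ []) :
    sklejanie P a b = true ↔ AnsA (PySem.List.sorted2 P Prod.fst Prod.snd) a b := by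
  set Q := PySem.List.sorted2 P Prod.fst Prod.snd with hQdef
  have hQ : Q.Pairwise (fun p q => p.1 ≤ q.1) := sorted2_pairwise_fst P
  have hlen : Q.length = P.length := (PySem.List.sorted2_perm P Prod.fst Prod.snd false).length_eq
  have hpos : 0 < Q.length := by
    rw [hlen]
    exact List.length_pos_of_ne_nil hne
  have hf0len : (List.replicate Q.length (none : Option Bool)).length = Q.length := by simp
  have hgood0 : goodT Q b (List.replicate Q.length none) := by
    intro j hj hjt; rw [mget_replicate] at hjt; simp at hjt
  show outerLoop Q a b (binarySearch2 Q a) (List.replicate Q.length none) = true ↔ _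
  by_cases hbs : binarySearch2 Q a = -1
  · have hnofst := bs2_neg hQ hbs
    have hcond : ¬ ((-1 : Int) < (Q.length : Int) ∧
        (PySem.List.pyGetD Q (-1) (0, 0)).1 = a) := by
      rintro ⟨_, hfst⟩
      rw [pyGetD_neg_one hpos] at hfst
      exact hnofst (Q.length - 1) (by omega) hfst
    rw [hbs, outerLoop.eq_def, dif_neg hcond]
    have hnoans : ¬ AnsA Q a b := by
      rintro ⟨j, hj, hfst, _⟩
      exact hnofst j hj hfst
    simp only [hQdef] at hnoans ⊢
    simpa using hnoans
  · rcases bs2_pos hQ hbs with ⟨hx0, hxn, hlow, hhigh⟩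
    rcases outer_main hQ (binarySearch2 Q a) (List.replicate Q.length none) hx0 hf0len hgood0
      with ⟨h1, h2⟩
    cases houter : outerLoop Q a b (binarySearch2 Q a) (List.replicate Q.length none) with
    | true => simpa using h1 houter
    | false =>
      have hnoans := h2 houter (fun j => by rw [mget_replicate]; simp)
        (fun k hk hfalse _ => by rw [mget_replicate] at hfalse; simp at hfalse)
        (fun j hj hjfst hji => absurd hjfst (ne_of_lt (hlow j hji hj)))
        (fun j hj hij => hhigh j hij hj)
      simpa using hnoans

-- ===== B-side: saturation =====
def StarQ (Q : List (Int × Int)) (x y : Int) : Prop :=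
  Relation.ReflTransGen (fun u v => (u, v) ∈ Q) x y

def AnsB (Q : List (Int × Int)) (a b : Int) : Prop :=
  ∃ p ∈ Q, StarQ Q a p.1 ∧ p.2 = b

def iterR (Q : List (Int × Int)) (a : Int) (k : Nat) : PySem.Set Int :=
  (List.range k).foldl (fun r _ => stepReach Q r) (PySem.Set.ofList [a])

theorem iterR_succ (Q : List (Int × Int)) (a : Int) (k : Nat) :
    iterR Q a (k + 1) = stepReach Q (iterR Q a k) := by
  rw [iterR, iterR, List.range_succ, List.foldl_append, List.foldl_cons, List.foldl_nil]

theorem mem_stepReach {Q : List (Int × Int)} {r : PySem.Set Int} (hr : r.Nodup) {y : Int} :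
    y ∈ stepReach Q r ↔ y ∈ r ∨ ∃ p ∈ Q, p.1 ∈ r ∧ y = p.2 := by
  rw [stepReach, PySem.Set.mem_union, PySem.Set.mem_ofList, List.mem_filterMap]
  constructor
  · rintro (h | ⟨p, hp, hf⟩)
    · exact Or.inl h
    · by_cases hc : PySem.Set.contains r p.1 = true
      · rw [if_pos hc] at hf
        exact Or.inr ⟨p, hp, (PySem.Set.contains_iff r p.1).mp hc, by simpa using hf.symm⟩
      · rw [if_neg hc] at hf
        simp at hf
  · rintro (h | ⟨p, hp, hf, hy⟩)
    · exact Or.inl h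
    · refine Or.inr ⟨p, hp, ?_⟩
      rw [if_pos ((PySem.Set.contains_iff r p.1).mpr hf), hy]

theorem nodup_iterR (Q : List (Int × Int)) (a : Int) (k : Nat) : (iterR Q a k).Nodup := by
  induction k with
  | zero => exact PySem.Set.nodup_ofList _
  | succ k ih =>
    rw [iterR_succ, stepReach]
    exact PySem.Set.nodup_union _ _ ih

theorem iterR_mono {Q : List (Int × Int)} {a : Int} {k : Nat} {y : Int}
    (h : y ∈ iterR Q a k) : y ∈ iterR Q a (k + 1) := by
  rw [iterR_succ, mem_stepReach (nodup_iterR Q a k)]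
  exact Or.inl h

theorem a_mem_iterR (Q : List (Int × Int)) (a : Int) (k : Nat) : a ∈ iterR Q a k := by
  induction k with
  | zero => rw [iterR]; simp [PySem.Set.mem_ofList]
  | succ k ih => exact iterR_mono ih

theorem iterR_sound {Q : List (Int × Int)} {a : Int} :
    ∀ (k : Nat) (y : Int), y ∈ iterR Q a k → StarQ Q a y := by
  intro k
  induction k with
  | zero =>
    intro y h
    rw [iterR] at h
    simp only [List.range_zero, List.foldl_nil, PySem.Set.mem_ofList,
      List.mem_singleton] at h
    subst h
    exact Relation.ReflTransGen.refl
  | succ k ih =>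
    intro y h
    rw [iterR_succ, mem_stepReach (nodup_iterR Q a k)] at h
    rcases h with h | ⟨p, hp, hf, hy⟩
    · exact ih y h
    · subst hy
      have hedge : (p.1, p.2) ∈ Q := by rw [Prod.mk.eta]; exact hp
      exact Relation.ReflTransGen.tail (ih p.1 hf) hedge

theorem iterR_subset (Q : List (Int × Int)) (a : Int) (k : Nat) :
    ∀ y ∈ iterR Q a k, y ∈ a :: Q.map Prod.snd := by
  induction k with
  | zero =>
    intro y hy
    rw [iterR] at hy
    simp [PySem.Set.mem_ofList] at hy
    simp [hy]
  | succ k ih =>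
    intro y hy
    rw [iterR_succ, mem_stepReach (nodup_iterR Q a k)] at hy
    rcases hy with hy | ⟨p, hp, _, hy⟩
    · exact ih y hy
    · subst hy
      exact List.mem_cons_of_mem _ (List.mem_map_of_mem hp)

theorem stepReach_congr {Q : List (Int × Int)} {r r' : PySem.Set Int} (hr : r.Nodup)
    (hr' : r'.Nodup) (h : ∀ z, z ∈ r ↔ z ∈ r') (y : Int) :
    y ∈ stepReach Q r ↔ y ∈ stepReach Q r' := by
  rw [mem_stepReach hr, mem_stepReach hr']
  constructor
  · rintro (hy | ⟨p, hp, hf, hy⟩)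
    · exact Or.inl ((h y).mp hy)
    · exact Or.inr ⟨p, hp, (h p.1).mp hf, hy⟩
  · rintro (hy | ⟨p, hp, hf, hy⟩)
    · exact Or.inl ((h y).mpr hy)
    · exact Or.inr ⟨p, hp, (h p.1).mpr hf, hy⟩

theorem iterR_stabilizes (Q : List (Int × Int)) (a : Int) :
    ∃ k, k ≤ Q.length ∧ ∀ y, y ∈ iterR Q a (k + 1) ↔ y ∈ iterR Q a k := by
  by_contra hcon
  push_neg at hcon
  have hgrow : ∀ k, k ≤ Q.length →
      (iterR Q a k).toFinset ⊂ (iterR Q a (k + 1)).toFinset := by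
    intro k hk
    rcases hcon k hk with ⟨y, hy⟩
    constructor
    · intro z hz
      rw [List.mem_toFinset] at *
      exact iterR_mono hz
    · intro hsub
      rcases hy with ⟨h1, h2⟩ | ⟨h1, h2⟩
      · exact h2 (List.mem_toFinset.mp (hsub (List.mem_toFinset.mpr h1)))
      · exact h1 (iterR_mono h2)
  have hcard : ∀ k, k ≤ Q.length + 1 → k + 1 ≤ (iterR Q a k).toFinset.card := by
    intro k
    induction k with
    | zero =>
      intro _
      have : a ∈ (iterR Q a 0).toFinset := List.mem_toFinset.mpr (a_mem_iterR Q a 0)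
      have := Finset.card_pos.mpr ⟨a, this⟩
      omega
    | succ k ih =>
      intro hk
      have h1 := ih (by omega)
      have h2 := Finset.card_lt_card (hgrow k (by omega))
      omega
  have hbound : (iterR Q a (Q.length + 1)).toFinset.card ≤ Q.length + 1 := by
    have hsub : (iterR Q a (Q.length + 1)).toFinset ⊆ (a :: Q.map Prod.snd).toFinset := by
      intro z hz
      rw [List.mem_toFinset] at *
      exact iterR_subset Q a _ z hz
    have := Finset.card_le_card hsub
    have h2 := List.toFinset_card_le (a :: Q.map Prod.snd)
    simp only [List.length_cons, List.length_map] at h2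
    omega
  have := hcard (Q.length + 1) (by omega)
  omega

theorem iterR_propagate {Q : List (Int × Int)} {a : Int} {k : Nat}
    (hfix : ∀ y, y ∈ iterR Q a (k + 1) ↔ y ∈ iterR Q a k) :
    ∀ m, k ≤ m → ∀ y, y ∈ iterR Q a m ↔ y ∈ iterR Q a k := by
  intro m
  induction m with
  | zero =>
    intro hm
    have : k = 0 := by omega
    subst this
    exact fun y => Iff.rfl
  | succ m ih =>
    intro hm y
    rcases Nat.lt_or_ge k (m + 1) with hlt | hge
    · have hmk : k ≤ m := by omega
      have hcong := stepReach_congr (Q := Q) (nodup_iterR Q a m) (nodup_iterR Q a k)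
        (ih hmk) y
      rw [iterR_succ, hcong, ← iterR_succ]
      exact hfix y
    · have : k = m + 1 := by omega
      subst this
      exact Iff.rfl

theorem iterR_closed (Q : List (Int × Int)) (a : Int) :
    ∀ p ∈ Q, p.1 ∈ iterR Q a Q.length → p.2 ∈ iterR Q a Q.length := by
  rcases iterR_stabilizes Q a with ⟨k, hk, hfix⟩
  have hp := iterR_propagate hfix
  intro p hp1 hmem
  have h1 : p.2 ∈ iterR Q a (Q.length + 1) := by
    rw [iterR_succ, mem_stepReach (nodup_iterR Q a Q.length)]
    exact Or.inr ⟨p, hp1, hmem, rfl⟩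
  rw [hp (Q.length + 1) (by omega) p.2] at h1
  rw [hp Q.length hk p.2]
  exact h1

theorem iterR_complete {Q : List (Int × Int)} {a y : Int} (h : StarQ Q a y) :
    y ∈ iterR Q a Q.length := by
  induction h with
  | refl => exact a_mem_iterR Q a Q.length
  | @tail u v hau huv ih =>
    exact iterR_closed Q a (u, v) huv ih

-- ===== B characterization, bridge, main =====
theorem sklejanie_charB (P : List (Int × Int)) (a b : Int) :
    sklejanie_alt P a b = true ↔ AnsB (PySem.List.sorted2 P Prod.fst Prod.snd) a b := by
  set Q := PySem.List.sorted2 P Prod.fst Prod.snd with hQdef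
  show (Q.any fun p => PySem.Set.contains (iterR Q a Q.length) p.1 && p.2 == b) = true ↔ _
  rw [List.any_eq_true]
  constructor
  · rintro ⟨p, hp, hcb⟩
    simp only [Bool.and_eq_true] at hcb
    rcases hcb with ⟨hc, hb⟩
    exact ⟨p, hp, iterR_sound _ _ ((PySem.Set.contains_iff _ _).mp hc), by simpa using hb⟩
  · rintro ⟨p, hp, hstar, hb⟩
    refine ⟨p, hp, ?_⟩
    simp only [Bool.and_eq_true]
    exact ⟨(PySem.Set.contains_iff _ _).mpr (iterR_complete hstar), by simp [hb]⟩

theorem star_RB {Q : List (Int × Int)} {b x y : Int} (hs : StarQ Q x y) (hr : RB Q b y) :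
    RB Q b x := by
  induction hs using Relation.ReflTransGen.head_induction_on with
  | refl => exact hr
  | head hedge _ ih => exact RB.step hedge ih

theorem ansA_iff_ansB {Q : List (Int × Int)} {a b : Int} : AnsA Q a b ↔ AnsB Q a b := by
  constructor
  · rintro ⟨j, hj, hfst, hRB⟩
    have key : ∀ v, RB Q b v → ∀ u, StarQ Q a u → (u, v) ∈ Q → AnsB Q a b := by
      intro v hv
      induction hv with
      | base => intro u hsu hedge; exact ⟨(u, b), hedge, hsu, rfl⟩
      | @step u' w hmem hrb ih =>
        intro u hsu hedge
        exact ih u' (Relation.ReflTransGen.tail hsu hedge) hmem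
    refine key (qget Q j).2 hRB a Relation.ReflTransGen.refl ?_
    have heq : (a, (qget Q j).2) = qget Q j := by rw [← hfst]
    rw [heq]
    exact qget_mem hj
  · rintro ⟨p, hp, hstar, hsnd⟩
    have hRBp1 : RB Q b p.1 := RB.step (by rw [Prod.mk.eta]; exact hp) (show RB Q b p.2 by rw [hsnd]; exact RB.base)
    rcases Relation.ReflTransGen.cases_head hstar with heq | ⟨c, hedge, hstar'⟩
    · rcases List.mem_iff_getElem.mp hp with ⟨j, hj, hEq⟩
      refine ⟨j, hj, ?_, ?_⟩
      · rw [qget, List.getD_eq_getElem _ _ hj, hEq, ← heq]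
      · rw [qget, List.getD_eq_getElem _ _ hj, hEq, hsnd]; exact RB.base
    · have hRBc : RB Q b c := star_RB hstar' hRBp1
      rcases List.mem_iff_getElem.mp hedge with ⟨j, hj, hEq⟩
      refine ⟨j, hj, ?_, ?_⟩
      · rw [qget, List.getD_eq_getElem _ _ hj, hEq]
      · rw [qget, List.getD_eq_getElem _ _ hj, hEq]; exact hRBc

theorem sklejanie_main (P : List (Int × Int)) (a b : Int) (hne : P ≠ []) :
    sklejanie P a b = sklejanie_alt P a b := by
  have hA := sklejanie_charA P a b hne
  have hB := sklejanie_charB P a b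
  have h := hA.trans (ansA_iff_ansB.trans hB.symm)
  cases hx : sklejanie P a b <;> cases hy : sklejanie_alt P a b <;> simp_all


-- ===== VERDICT (by name: the statement is the Claim_ definition above) =====
theorem sklejanie_spec : Claim_equal_sklejanie := by
  intro P a b _ hpre
  show sklejanie P a b = sklejanie_alt P a b
  exact sklejanie_main P a b hpre

theorem sklejanie_raises : Claim_raises_sklejanie := by
  unfold Claim_raises_sklejanie
  exact ⟨fun P a b _ hr hpre => hpre hr, by decide⟩

-- witness self-check: B's port really returns the stated literal at the raise witness
theorem sklejanie_raises_ok :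
    sklejanie_alt pvRaiseWitness_sklejanie.1 pvRaiseWitness_sklejanie.2.1
      pvRaiseWitness_sklejanie.2.2 = pvRaiseWitnessOut_sklejanie :=
  sklejanie_raises.2.2.2
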